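-- pv_equiv track=rewrite | github.com/MaciejZakrzewski/PISI | KNN_Recomm/main.py | prepare_map
-- ===== SOURCE A (Python) =====
-- def prepare_map(list_to_refactor):
--     person_id_list = dict()
--
--     for row in list_to_refactor:
--         if row[1] not in person_id_list:
--             person_id_list[row[1]] = []
--
--     for row in list_to_refactor:
--         x = person_id_list[row[1]]
--         x.append((row[2], row[3]))
--         person_id_list[row[1]] = x
--
--     return person_id_list
-- ===== SOURCE B (Python) =====
-- def prepare_map(list_to_refactor):
--     person_id_list = dict()
--     rest = list_to_refactor
--     while rest:
--         key = rest[0][1]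
--         group = []
--         others = []
--         for row in rest:
--             if row[1] == key:
--                 group.append((row[2], row[3]))
--             else:
--                 others.append(row)
--         person_id_list[key] = group
--         rest = others
--     return person_id_list
-- ===== Notes on version B (the rewrite author's own statement) =====
-- stated objective: alternative
-- what changed: Replaces A's two dict-building passes with a key-at-a-time partition loop: repeatedly take the first remaining row's person id, split the remaining rows into that id's (x,y) group and the rest, emit the group, and continue on the rest; no per-row dict lookups remain.
import Mathlib
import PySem

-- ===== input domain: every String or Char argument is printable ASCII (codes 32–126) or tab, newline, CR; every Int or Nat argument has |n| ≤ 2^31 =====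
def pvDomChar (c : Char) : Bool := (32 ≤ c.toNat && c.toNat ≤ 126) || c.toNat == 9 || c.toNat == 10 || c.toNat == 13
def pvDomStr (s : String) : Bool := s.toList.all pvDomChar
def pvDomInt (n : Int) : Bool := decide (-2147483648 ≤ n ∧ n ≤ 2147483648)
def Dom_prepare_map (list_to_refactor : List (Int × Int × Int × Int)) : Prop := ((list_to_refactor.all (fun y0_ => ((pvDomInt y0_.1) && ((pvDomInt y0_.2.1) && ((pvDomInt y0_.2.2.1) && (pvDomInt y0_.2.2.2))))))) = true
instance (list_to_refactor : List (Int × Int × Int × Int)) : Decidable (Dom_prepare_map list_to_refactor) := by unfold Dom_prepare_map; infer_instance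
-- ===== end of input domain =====

-- B replaces A's two dict-building passes by a key-at-a-time partition loop (extract the
-- first remaining id's whole group, recurse on the rest); objective: alternative.

-- ===== PORT A =====
def prepare_map (list_to_refactor : List (Int × Int × Int × Int)) : List (Int × List (Int × Int)) :=
  -- person_id_list = dict(); first loop: prime each new key with []
  let d1 := list_to_refactor.foldl
    (fun d row => if d.contains row.2.1 then d else d.insert row.2.1 []) PySem.Dict.empty
  -- second loop: x = d[row[1]]; x.append((row[2], row[3])); d[row[1]] = x
  -- (the key is always present after the first loop, so d[row[1]] = d.getD row[1] [] exactly)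
  let d2 := list_to_refactor.foldl
    (fun d row =>
      let x := d.getD row.2.1 []
      d.insert row.2.1 (x ++ [(row.2.2.1, row.2.2.2)])) d1
  d2.items

-- ===== PORT B =====
-- B's inner 'for row in rest' loop: append row's pair to group or row itself to others
def pmStep (key : Int) (acc : List (Int × Int) × List (Int × Int × Int × Int))
    (row : Int × Int × Int × Int) : List (Int × Int) × List (Int × Int × Int × Int) :=
  if row.2.1 == key then (acc.1 ++ [(row.2.2.1, row.2.2.2)], acc.2) else (acc.1, acc.2 ++ [row])

-- termination helper for the while loop: 'others' is strictly shorter than 'rest'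
theorem pmStep_snd_len (key : Int) (rs : List (Int × Int × Int × Int))
    (acc : List (Int × Int) × List (Int × Int × Int × Int)) :
    (rs.foldl (pmStep key) acc).2.length ≤ acc.2.length + rs.length := by
  induction rs generalizing acc with
  | nil => simp
  | cons r rs ih =>
    simp only [List.foldl_cons, List.length_cons]
    refine le_trans (ih _) ?_
    unfold pmStep
    split
    · simp
    · simp
      omega

theorem pmStep_first_lt (r : Int × Int × Int × Int) (rs : List (Int × Int × Int × Int)) :
    ((r :: rs).foldl (pmStep r.2.1) ([], [])).2.length < (r :: rs).length := by
  simp only [List.foldl_cons, List.length_cons]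
  have h0 : pmStep r.2.1 ([], []) r = ([(r.2.2.1, r.2.2.2)], []) := by
    unfold pmStep; simp
  rw [h0]
  have := pmStep_snd_len r.2.1 rs ([(r.2.2.1, r.2.2.2)], [])
  simp only [List.length_nil, Nat.zero_add] at this
  omega

-- B: while rest: key = rest[0][1]; partition rest into (group, others); emit; rest = others
def prepare_map_alt (list_to_refactor : List (Int × Int × Int × Int)) : List (Int × List (Int × Int)) :=
  match list_to_refactor with
  | [] => []
  | r :: rs =>
    let key := r.2.1
    let go := (r :: rs).foldl (pmStep key) ([], [])
    (key, go.1) :: prepare_map_alt go.2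
termination_by list_to_refactor.length
decreasing_by
  simpa using pmStep_first_lt r rs

-- ===== PRECONDITION & SPEC =====
def Spec_prepare_map (list_to_refactor : List (Int × Int × Int × Int)) (out : List (Int × List (Int × Int))) : Prop := out = prepare_map_alt list_to_refactor
instance (list_to_refactor : List (Int × Int × Int × Int)) (out : List (Int × List (Int × Int))) : Decidable (Spec_prepare_map list_to_refactor out) := by unfold Spec_prepare_map; infer_instance

-- ===== CLAIM (what is proved, stated in full; the proofs are below) =====
def Claim_equal_prepare_map : Prop := ∀ (list_to_refactor : List (Int × Int × Int × Int)), Dom_prepare_map list_to_refactor → Spec_prepare_map list_to_refactor (prepare_map list_to_refactor)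

-- ===== LEMMAS AND PROOFS =====

-- the per-key group and the remaining rows, and the canonical form both programs reach
def pmPairs (xs : List (Int × Int × Int × Int)) (k : Int) : List (Int × Int) :=
  (xs.filter (fun r => r.2.1 == k)).map (fun r => (r.2.2.1, r.2.2.2))
def pmRest (xs : List (Int × Int × Int × Int)) (k : Int) : List (Int × Int × Int × Int) :=
  xs.filter (fun r => !(r.2.1 == k))
def pmCanon (xs : List (Int × Int × Int × Int)) : List (Int × List (Int × Int)) :=
  (PySem.Set.ofList (xs.map (fun r => r.2.1))).map (fun k => (k, pmPairs xs k))

-- ---- B = canon ----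

theorem pmStep_spec (key : Int) (rs : List (Int × Int × Int × Int))
    (g : List (Int × Int)) (o : List (Int × Int × Int × Int)) :
    rs.foldl (pmStep key) (g, o) = (g ++ pmPairs rs key, o ++ pmRest rs key) := by
  induction rs generalizing g o with
  | nil => simp [pmPairs, pmRest]
  | cons r rs ih =>
    rw [List.foldl_cons]
    by_cases h : r.2.1 == key
    · rw [show pmStep key (g, o) r = (g ++ [(r.2.2.1, r.2.2.2)], o) from by
        unfold pmStep; rw [if_pos h], ih]
      simp [pmPairs, pmRest, h]
    · rw [show pmStep key (g, o) r = (g, o ++ [r]) from by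
        unfold pmStep; rw [if_neg h], ih]
      simp only [pmPairs, pmRest, List.filter_cons]
      simp at h
      simp [h]

theorem pmDiscard_eq_filter (s : List Int) (x : Int) :
    PySem.Set.discard s x = s.filter (fun y => !(y == x)) := by
  simp [PySem.Set.discard]

theorem pmOfList_filter (l : List Int) (k : Int) :
    (PySem.Set.ofList l).filter (fun y => !(y == k)) = PySem.Set.ofList (l.filter (fun y => !(y == k))) := by
  induction l with
  | nil => rfl
  | cons x l ih =>
    rw [PySem.Set.ofList_cons, pmDiscard_eq_filter, List.filter_cons, List.filter_cons]
    by_cases h : x = k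
    · subst h
      simp only [beq_self_eq_true, Bool.not_true, Bool.false_eq_true, if_false]
      rw [← ih, List.filter_comm, List.filter_eq_self.mpr]
      intro a ha
      exact (List.mem_filter.1 ha).2
    · have hq : (!(x == k)) = true := by simp [h]
      simp only [hq, if_true]
      rw [PySem.Set.ofList_cons, pmDiscard_eq_filter, ← ih, List.filter_comm]

theorem pmAlt_eq_canon (xs : List (Int × Int × Int × Int)) :
    prepare_map_alt xs = pmCanon xs := by
  induction hn : xs.length using Nat.strong_induction_on generalizing xs with
  | _ n ih =>
  match xs with
  | [] => rw [prepare_map_alt]; rfl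
  | r :: rs =>
    rw [prepare_map_alt]
    have hsp := pmStep_spec r.2.1 (r :: rs) [] []
    simp only [hsp, List.nil_append]
    have hrest : pmRest (r :: rs) r.2.1 = pmRest rs r.2.1 := by
      simp [pmRest]
    have hlen : (pmRest rs r.2.1).length < n := by
      rw [← hn]
      simp only [List.length_cons, pmRest]
      exact Nat.lt_succ_of_le (List.length_filter_le _ _)
    rw [hrest, ih _ hlen _ rfl]
    -- now show (k, pairs) :: canon (rest) = canon (r :: rs)
    unfold pmCanon
    rw [List.map_cons, PySem.Set.ofList_cons]
    have hd : PySem.Set.discard (PySem.Set.ofList (rs.map (fun r => r.2.1))) r.2.1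
        = PySem.Set.ofList ((pmRest rs r.2.1).map (fun r => r.2.1)) := by
      have hmf : (pmRest rs r.2.1).map (fun r => r.2.1)
          = (rs.map (fun r => r.2.1)).filter (fun y => !(y == r.2.1)) := by
        simp [pmRest, List.filter_map, Function.comp_def]
      rw [hmf, ← pmOfList_filter, pmDiscard_eq_filter]
    rw [List.map_cons, hd]
    congr 1
    apply List.map_congr_left
    intro k hk
    have hkne : ¬(k == r.2.1) = true := by
      have hk2 := (PySem.Set.mem_ofList _ _).1 hk
      rcases List.mem_map.1 hk2 with ⟨s, hs, rfl⟩
      unfold pmRest at hs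
      have := (List.mem_filter.1 hs).2
      simpa using this
    have hpairs : pmPairs (pmRest rs r.2.1) k = pmPairs (r :: rs) k := by
      unfold pmPairs pmRest
      rw [List.filter_cons]
      rw [if_neg (by simpa using fun h => hkne (by simp [h]))]
      rw [List.filter_comm, List.filter_eq_self.mpr]
      intro a ha
      have hak : (a.2.1 == k) = true := (List.mem_filter.1 ha).2
      simp at hak ⊢
      rw [hak]
      simpa using hkne
    rw [hpairs]

-- ---- A = canon ----

-- A's first loop (priming pass), starting from an arbitrary dict
def pmPrime (d : PySem.Dict Int (List (Int × Int))) (xs : List (Int × Int × Int × Int)) :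
    PySem.Dict Int (List (Int × Int)) :=
  xs.foldl (fun d row => if d.contains row.2.1 then d else d.insert row.2.1 []) d

-- the appending loop (A's second loop)
def pmApp (d : PySem.Dict Int (List (Int × Int))) (xs : List (Int × Int × Int × Int)) :
    PySem.Dict Int (List (Int × Int)) :=
  xs.foldl (fun d row => d.insert row.2.1 (d.getD row.2.1 [] ++ [(row.2.2.1, row.2.2.2)])) d

theorem pmPrime_cons (d : PySem.Dict Int (List (Int × Int))) (r : Int × Int × Int × Int)
    (xs : List (Int × Int × Int × Int)) :
    pmPrime d (r :: xs) = pmPrime (if d.contains r.2.1 then d else d.insert r.2.1 []) xs := rfl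
theorem pmApp_cons (d : PySem.Dict Int (List (Int × Int))) (r : Int × Int × Int × Int)
    (xs : List (Int × Int × Int × Int)) :
    pmApp d (r :: xs) = pmApp (d.insert r.2.1 (d.getD r.2.1 [] ++ [(r.2.2.1, r.2.2.2)])) xs := rfl

-- inserting at a contained key commutes with inserting a fresh key
theorem pm_insert_comm (d : PySem.Dict Int (List (Int × Int))) (k k' : Int)
    (v w : List (Int × Int)) (hk : d.contains k = true) (hk' : d.contains k' = false) :
    (d.insert k v).insert k' w = (d.insert k' w).insert k v := by
  have hne : k' ≠ k := by rintro rfl; rw [hk] at hk'; exact absurd hk' (by simp)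
  apply PySem.Dict.ext
  have h1 : (d.insert k v).contains k' = false := by
    rw [PySem.Dict.contains_insert]; simp [hne, hk']
  have h2 : (d.insert k' w).contains k = true := by
    rw [PySem.Dict.contains_insert]; simp [hk]
  rw [PySem.Dict.items_insert_of_not_contains _ _ h1,
      PySem.Dict.items_insert_of_contains _ _ hk,
      PySem.Dict.items_insert_of_contains _ _ h2,
      PySem.Dict.items_insert_of_not_contains _ _ hk']
  simp [List.map_append]
  exact fun h => absurd h hne

-- the priming pass preserves values at contained keys
theorem pmPrime_getD (xs : List (Int × Int × Int × Int))
    (d : PySem.Dict Int (List (Int × Int))) (k : Int) (hk : d.contains k = true) :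
    (pmPrime d xs).getD k [] = d.getD k [] := by
  induction xs generalizing d with
  | nil => rfl
  | cons r xs ih =>
    rw [pmPrime_cons]
    split
    · exact ih d hk
    · rename_i h
      have hne : k ≠ r.2.1 := by rintro rfl; rw [hk] at h; exact h rfl
      rw [ih _ (by rw [PySem.Dict.contains_insert, hk]; simp),
          PySem.Dict.getD_insert_of_ne _ _ _ hne]

-- priming commutes with overwriting an already-contained key
theorem pmPrime_insert (xs : List (Int × Int × Int × Int))
    (d : PySem.Dict Int (List (Int × Int))) (k : Int) (v : List (Int × Int))
    (hk : d.contains k = true) :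
    pmPrime (d.insert k v) xs = (pmPrime d xs).insert k v := by
  induction xs generalizing d with
  | nil => rfl
  | cons r xs ih =>
    rw [pmPrime_cons, pmPrime_cons]
    by_cases hdr : d.contains r.2.1 = true
    · have hc : (d.insert k v).contains r.2.1 = true := by
        rw [PySem.Dict.contains_insert]; simp [hdr]
      rw [if_pos hc, if_pos hdr]
      exact ih d hk
    · have hdrf : d.contains r.2.1 = false := by simpa using hdr
      rw [if_neg hdr]
      by_cases hrk : r.2.1 = k
      · exact absurd hk (by rw [hrk] at hdrf; simp [hdrf])
      · have hc : (d.insert k v).contains r.2.1 = true → False := by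
          rw [PySem.Dict.contains_insert]; simp [hrk, hdrf]
        rw [if_neg hc,
            pm_insert_comm d k r.2.1 v [] hk hdrf,
            ih _ (by rw [PySem.Dict.contains_insert, hk]; simp)]

-- main A-side lemma: the appending loop after the priming pass = the appending loop alone
theorem pmApp_prime (xs : List (Int × Int × Int × Int))
    (d : PySem.Dict Int (List (Int × Int))) :
    pmApp (pmPrime d xs) xs = pmApp d xs := by
  induction xs generalizing d with
  | nil => rfl
  | cons r xs ih =>
    rw [pmPrime_cons, pmApp_cons, pmApp_cons]
    by_cases hdr : d.contains r.2.1 = true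
    · rw [if_pos hdr, pmPrime_getD xs d r.2.1 hdr, ← pmPrime_insert xs d r.2.1 _ hdr, ih]
    · have hdrf : d.contains r.2.1 = false := by simpa using hdr
      have hget : d.getD r.2.1 [] = [] := PySem.Dict.getD_of_not_contains _ _ hdrf
      have hc : (d.insert r.2.1 ([] : List (Int × Int))).contains r.2.1 = true :=
        PySem.Dict.contains_insert_self ..
      rw [if_neg hdr, pmPrime_getD xs _ r.2.1 hc, PySem.Dict.getD_insert_self,
          ← pmPrime_insert xs _ r.2.1 _ hc, PySem.Dict.insert_insert_self, hget, ih]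

-- value of the single appending loop at any key
theorem pmApp_getD (xs : List (Int × Int × Int × Int))
    (d : PySem.Dict Int (List (Int × Int))) (k : Int) :
    (pmApp d xs).getD k [] = d.getD k [] ++ pmPairs xs k := by
  induction xs generalizing d with
  | nil => simp [pmApp, pmPairs]
  | cons r xs ih =>
    rw [pmApp_cons, ih]
    rw [PySem.Dict.getD_insert]
    by_cases h : k = r.2.1
    · subst h
      simp [pmPairs]
    · rw [if_neg h]
      simp only [pmPairs, List.filter_cons]
      rw [if_neg (by simpa using fun hh => h hh.symm)]

theorem pmA_eq_canon (xs : List (Int × Int × Int × Int)) :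
    (pmApp PySem.Dict.empty xs).items = pmCanon xs := by
  have hkeys : (pmApp PySem.Dict.empty xs).keys = PySem.Set.ofList (xs.map (fun r => r.2.1)) := by
    unfold pmApp
    rw [PySem.Dict.keys_foldl_insert_key]
    simp [PySem.Set.update_nil_left, PySem.Dict.keys_empty]
  have hnd : (pmApp PySem.Dict.empty xs).keys.Nodup := by
    rw [hkeys]; exact PySem.Set.nodup_ofList _
  rw [PySem.Dict.items_eq_map_keys _ hnd []]
  rw [hkeys]
  unfold pmCanon
  apply List.map_congr_left
  intro k _
  rw [pmApp_getD]
  simp [PySem.Dict.getD_empty]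

-- ===== VERDICT (by name: the statement is the Claim_ definition above) =====
theorem prepare_map_spec : Claim_equal_prepare_map := by
  intro xs _
  show prepare_map xs = prepare_map_alt xs
  show (pmApp (pmPrime PySem.Dict.empty xs) xs).items = prepare_map_alt xs
  rw [pmApp_prime, pmA_eq_canon, pmAlt_eq_canon]
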